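-- pv_equiv track=rewrite | github.com/aYaFish/leetcode | 90.subsets-ii.py | subsetsNoNeighborWithDup
-- ===== SOURCE A (Python) =====
-- from typing import List
--
-- def subsetsNoNeighborWithDup(nums: List[int]) -> List[List[int]]:
--     nums.sort()
--     path = []
--     ans = []
--
--     def dfs(nums, pos):
--         ans.append(path[:])
--         if pos >= len(nums):
--             return
--
--         for i in range(pos, len(nums)):
--             if i>pos and nums[i] == nums[i-1]:
--                 continue
--             path.append(nums[i])
--             dfs(nums, i+2)
--             path.pop()
--
--     dfs(nums, 0)
--     return ans
-- ===== SOURCE B (Python) =====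
-- from typing import List
--
-- def subsetsNoNeighborWithDup(nums: List[int]) -> List[List[int]]:
--     nums.sort()
--     n = len(nums)
--     # g[0] holds the chains for position pos+1 (initially n); g covers positions pos+1 .. n+1.
--     # A chain is None (empty subset) or (head, tail-chain); chains share tails across table entries.
--     g = [[None], [None]]
--     for pos in range(n - 1, -1, -1):
--         res = [None]
--         for i in range(pos, n):
--             if i > pos and nums[i] == nums[i - 1]:
--                 continue
--             res += [(nums[i], s) for s in g[i + 1 - pos]]
--         g.insert(0, res)
--     out = []
--     for chain in g[0]:
--         lst = []
--         while chain is not None: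
--             lst.append(chain[0])
--             chain = chain[1]
--         out.append(lst)
--     return out
-- ===== Notes on version B (the rewrite author's own statement) =====
-- stated objective: alternative
-- what changed: Replaces the recursive DFS over (pos, path) with a bottom-up dynamic-programming table of suffix answers g[pos] built from the right, whose entries are tail-sharing cons chains expanded to lists only at the end; it trades extra memory for the table against A's recomputation-free but recursion-based traversal.
import Mathlib
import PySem

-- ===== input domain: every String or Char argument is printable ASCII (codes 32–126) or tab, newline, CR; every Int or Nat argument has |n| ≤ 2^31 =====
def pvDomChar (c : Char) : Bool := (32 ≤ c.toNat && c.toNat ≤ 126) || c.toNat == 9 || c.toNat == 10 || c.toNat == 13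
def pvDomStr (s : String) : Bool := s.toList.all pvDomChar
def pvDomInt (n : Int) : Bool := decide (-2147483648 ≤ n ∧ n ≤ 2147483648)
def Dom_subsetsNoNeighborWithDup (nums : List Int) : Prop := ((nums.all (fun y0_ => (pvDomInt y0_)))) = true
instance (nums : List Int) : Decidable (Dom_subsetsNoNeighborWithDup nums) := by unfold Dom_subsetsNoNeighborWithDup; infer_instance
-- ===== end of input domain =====

-- B replaces A's recursive DFS by a bottom-up table of suffix answers (alternative
-- decomposition, same cost); both Pythons sort nums in place — the equivalence here
-- is about the return value.

-- ===== PORT A =====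
-- dfs(nums, pos) with the mutable `path`/`ans`: ans-extension becomes the returned list,
-- `for i in range(pos, len(nums))` is a foldl over List.range' pos (len - pos).
def aDfs (ns : List Int) (pos : Nat) (path : List Int) : List (List Int) :=
  path ::
    (if ns.length ≤ pos then []
     else
       (List.range' pos (ns.length - pos)).attach.foldl
         (fun acc i =>
           if pos < i.1 ∧ ns[i.1]! = ns[i.1 - 1]! then acc
           else acc ++ aDfs ns (i.1 + 2) (path ++ [ns[i.1]!]))
         [])
termination_by ns.length - pos
decreasing_by
  have h := i.2
  simp [List.mem_range'] at h
  omega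

def subsetsNoNeighborWithDup (nums : List Int) : List (List Int) :=
  aDfs (PySem.List.sorted nums (fun x => x) false) 0 []

-- ===== PORT B =====
-- Source B's chains (None | (head, tail)) are exactly Lean lists: None ↔ [], (h, s) ↔ h :: s.
-- one iteration of Source B's descending loop: compute res for this pos and prepend it
-- (the table list g has head = chains for the lowest position computed so far)
def bStep (ns : List Int) (pos : Nat) (t : List (List (List Int))) : List (List (List Int)) :=
  (([] : List Int) ::
    (List.range' pos (ns.length - pos)).foldl
      (fun acc i =>
        if pos < i ∧ ns[i]! = ns[i - 1]! then acc
        else acc ++ (t.getD (i + 1 - pos) [[]]).map (fun s => ns[i]! :: s))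
      []) :: t

-- the table after k iterations of the loop (pos = len-1 down to len-k)
def bTabs (ns : List Int) : Nat → List (List (List Int))
  | 0 => [[[]], [[]]]
  | k + 1 => bStep ns (ns.length - (k + 1)) (bTabs ns k)

-- Source B's final while-loop turning one chain into a Python list (append head, step to tail)
def bToList (acc : List Int) : List Int → List Int
  | [] => acc
  | h :: t => bToList (acc ++ [h]) t

def subsetsNoNeighborWithDup_alt (nums : List Int) : List (List Int) :=
  let ns := PySem.List.sorted nums (fun x => x) false
  ((bTabs ns ns.length).getD 0 [[]]).map (bToList [])

-- ===== PRECONDITION & SPEC =====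
def Spec_subsetsNoNeighborWithDup (nums : List Int) (out : List (List Int)) : Prop := out = subsetsNoNeighborWithDup_alt nums
instance (nums : List Int) (out : List (List Int)) : Decidable (Spec_subsetsNoNeighborWithDup nums out) := by unfold Spec_subsetsNoNeighborWithDup; infer_instance

-- ===== CLAIM (what is proved, stated in full; the proofs are below) =====
def Claim_equal_subsetsNoNeighborWithDup : Prop := ∀ (nums : List Int), Dom_subsetsNoNeighborWithDup nums → Spec_subsetsNoNeighborWithDup nums (subsetsNoNeighborWithDup nums)

-- ===== LEMMAS AND PROOFS =====

lemma aDfs_ge (ns : List Int) (pos : Nat) (path : List Int) (h : ns.length ≤ pos) :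
    aDfs ns pos path = [path] := by
  rw [aDfs]; simp [h]

-- `path` only prefixes every produced subset
lemma foldl_if_append {α β : Type} (l : List α) (c : α → Prop) [DecidablePred c]
    (g : α → List β) (acc : List β) :
    l.foldl (fun acc x => if c x then acc else acc ++ g x) acc
      = acc ++ l.flatMap (fun x => if c x then [] else g x) := by
  induction l generalizing acc with
  | nil => simp
  | cons a t ih => by_cases h : c a <;> simp [h, ih]

lemma flatMap_congr_mem {α β : Type} (l : List α) (f g : α → List β)
    (h : ∀ x ∈ l, f x = g x) : l.flatMap f = l.flatMap g := by
  induction l with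
  | nil => rfl
  | cons a t ih =>
    simp only [List.flatMap_cons, h a (List.mem_cons_self), ih fun x hx => h x (List.mem_cons_of_mem _ hx)]

lemma aDfs_path (ns : List Int) :
    ∀ k pos path, ns.length - pos ≤ k →
      aDfs ns pos path = (aDfs ns pos []).map (path ++ ·) := by
  intro k
  induction k with
  | zero =>
    intro pos path h
    have hp : ns.length ≤ pos := by omega
    rw [aDfs_ge _ _ _ hp, aDfs_ge _ _ _ hp]; simp
  | succ k ih =>
    intro pos path h
    by_cases hp : ns.length ≤ pos
    · rw [aDfs_ge _ _ _ hp, aDfs_ge _ _ _ hp]; simp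
    · rw [aDfs, aDfs]
      simp only [if_neg hp, foldl_if_append, List.nil_append, List.map_cons, List.append_nil]
      congr 1
      rw [List.map_flatMap]
      apply flatMap_congr_mem
      rintro ⟨i, hi⟩ -
      simp only [List.mem_range'] at hi
      have h2 : ns.length - (i + 2) ≤ k := by omega
      by_cases hc : pos < i ∧ ns[i]! = ns[i - 1]!
      · rw [if_pos hc, if_pos hc]; rfl
      · rw [if_neg hc, if_neg hc]
        show aDfs ns (i + 2) (path ++ [ns[i]!])
              = List.map (fun x => path ++ x) (aDfs ns (i + 2) [ns[i]!])
        rw [ih (i + 2) (path ++ [ns[i]!]) h2, ih (i + 2) [ns[i]!] h2, List.map_map]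
        apply List.map_congr_left
        intro s _
        simp

lemma bTabs_getD (ns : List Int) :
    ∀ k, k ≤ ns.length → ∀ j,
      (bTabs ns k).getD j [[]] = aDfs ns (ns.length - k + j) [] := by
  intro k
  induction k with
  | zero =>
    intro _ j
    have hL : (bTabs ns 0).getD j [[]] = [[]] := by
      cases j with
      | zero => rfl
      | succ j => cases j <;> rfl
    rw [hL, aDfs_ge _ _ _ (by omega)]
  | succ k ih =>
    intro hk j
    have hkn : k ≤ ns.length := by omega
    cases j with
    | succ j =>
      show (bTabs ns k).getD j [[]] = aDfs ns (ns.length - (k + 1) + (j + 1)) []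
      rw [ih hkn j]
      congr 1
      omega
    | zero =>
      show (([] : List Int) ::
        (List.range' (ns.length - (k + 1)) (ns.length - (ns.length - (k + 1)))).foldl
          (fun acc i =>
            if ns.length - (k + 1) < i ∧ ns[i]! = ns[i - 1]! then acc
            else acc ++ ((bTabs ns k).getD (i + 1 - (ns.length - (k + 1))) [[]]).map
              (fun s => ns[i]! :: s)) [])
        = aDfs ns (ns.length - (k + 1) + 0) []
      rw [aDfs]
      have hp : ¬ ns.length ≤ ns.length - (k + 1) + 0 := by omega
      rw [if_neg hp]
      simp only [Nat.add_zero]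
      congr 1
      rw [foldl_if_append, foldl_if_append, List.nil_append, List.nil_append]
      conv_lhs => rw [← List.attach_map_subtype_val
        (List.range' (ns.length - (k + 1)) (ns.length - (ns.length - (k + 1))))]
      rw [List.flatMap_map]
      apply flatMap_congr_mem
      rintro ⟨i, hmem⟩ -
      simp only [List.mem_range'] at hmem
      show (if ns.length - (k + 1) < i ∧ ns[i]! = ns[i - 1]! then []
            else List.map (fun s => ns[i]! :: s)
              ((bTabs ns k).getD (i + 1 - (ns.length - (k + 1))) [[]]))
          = if ns.length - (k + 1) < i ∧ ns[i]! = ns[i - 1]! then []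
            else aDfs ns (i + 2) ([] ++ [ns[i]!])
      by_cases hc : ns.length - (k + 1) < i ∧ ns[i]! = ns[i - 1]!
      · rw [if_pos hc, if_pos hc]
      · rw [if_neg hc, if_neg hc, ih hkn (i + 1 - (ns.length - (k + 1)))]
        have harith : ns.length - k + (i + 1 - (ns.length - (k + 1))) = i + 2 := by omega
        rw [harith, List.nil_append,
            aDfs_path ns ns.length (i + 2) [ns[i]!] (by omega)]
        apply List.map_congr_left
        intro s _
        rfl

lemma bToList_eq : ∀ (c acc : List Int), bToList acc c = acc ++ c := by
  intro c
  induction c with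
  | nil => simp [bToList]
  | cons h t ih => intro acc; rw [bToList, ih]; simp

-- ===== VERDICT (by name: the statement is the Claim_ definition above) =====
theorem subsetsNoNeighborWithDup_spec : Claim_equal_subsetsNoNeighborWithDup := by
  intro nums _
  unfold Spec_subsetsNoNeighborWithDup subsetsNoNeighborWithDup subsetsNoNeighborWithDup_alt
  simp only [bTabs_getD _ _ (le_refl _) 0, Nat.sub_self, Nat.add_zero]
  have hid : bToList ([] : List Int) = id := funext fun c => by rw [bToList_eq]; simp
  rw [hid, List.map_id]
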